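-- pv_equiv track=rewrite | github.com/jujedev/TP4_AED | TP3_Cristian_Mauricio/TP3_AED-main/tp2_aed.py | hc_o_sc
-- ===== SOURCE A (Python) =====
-- def hc_o_sc(direccion):
--     f_h = False
--     f_hc = False
--     ctrl = None
--     for letra in direccion:
--         if letra == "H":
--             f_h = True
--         if letra == "C" and f_h:
--             f_hc = True
--             f_h = False
--     if f_hc == True:
--         ctrl = "Hard Control"
--     else:
--         ctrl = "Soft Control"
--     return ctrl
-- ===== SOURCE B (Python) =====
-- def hc_o_sc(direccion):
--     h = direccion.find("H")
--     if h != -1 and "C" in direccion[h+1:]: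
--         return "Hard Control"
--     return "Soft Control"
-- ===== Notes on version B (the rewrite author's own statement) =====
-- stated objective: faster
-- what changed: Replaces the one-pass two-flag boolean state machine with a locate-then-scan decomposition: str.find locates the first target letter, then substring membership checks the remaining suffix, moving the work into C-level string primitives.
import Mathlib
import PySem

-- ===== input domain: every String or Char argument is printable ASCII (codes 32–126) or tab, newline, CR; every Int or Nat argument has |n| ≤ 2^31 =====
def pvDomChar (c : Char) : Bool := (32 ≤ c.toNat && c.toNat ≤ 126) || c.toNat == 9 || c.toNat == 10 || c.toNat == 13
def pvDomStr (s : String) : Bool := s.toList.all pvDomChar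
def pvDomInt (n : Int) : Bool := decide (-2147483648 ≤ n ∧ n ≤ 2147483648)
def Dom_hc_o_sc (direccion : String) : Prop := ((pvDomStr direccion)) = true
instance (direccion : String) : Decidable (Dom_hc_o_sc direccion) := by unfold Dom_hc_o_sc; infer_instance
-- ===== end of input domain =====

-- B replaces A's one-pass two-flag state machine with find-first-'H' then scan the suffix for 'C'.

-- ===== PORT A =====
-- loop body: for letra in direccion, state = (f_h, f_hc)
def hcStep (s : Bool × Bool) (letra : Char) : Bool × Bool :=
  let f_h := if letra = 'H' then true else s.1
  if letra = 'C' ∧ f_h = true then (false, true) else (f_h, s.2)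

def hc_o_sc (direccion : String) : String :=
  let st := direccion.toList.foldl hcStep (false, false)
  if st.2 = true then "Hard Control" else "Soft Control"

-- ===== PORT B =====
def hc_o_sc_alt (direccion : String) : String :=
  let h := PySem.Str.find direccion "H"
  if h ≠ -1 ∧ PySem.Str.isIn "C" (PySem.Str.slice direccion (some (h + 1)) none) = true then
    "Hard Control"
  else
    "Soft Control"

-- ===== PRECONDITION & SPEC =====
def Spec_hc_o_sc (direccion : String) (out : String) : Prop := out = hc_o_sc_alt direccion
instance (direccion : String) (out : String) : Decidable (Spec_hc_o_sc direccion out) := by unfold Spec_hc_o_sc; infer_instance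

-- ===== CLAIM (what is proved, stated in full; the proofs are below) =====
def Claim_equal_hc_o_sc : Prop := ∀ (direccion : String), Dom_hc_o_sc direccion → Spec_hc_o_sc direccion (hc_o_sc direccion)

-- ===== LEMMAS AND PROOFS =====

-- the pattern A's fold recognises: an 'H' with some 'C' strictly later
def hcPat : List Char → Bool
  | [] => false
  | c :: t => if c = 'H' then t.contains 'C' else hcPat t

theorem hcStep_snd_true (l : List Char) (a : Bool) :
    (l.foldl hcStep (a, true)).2 = true := by
  induction l generalizing a with
  | nil => rfl
  | cons c t ih =>
    rw [List.foldl_cons]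
    by_cases hc : c = 'C' ∧ (if c = 'H' then true else a) = true
    · show (List.foldl hcStep (if c = 'C' ∧ (if c = 'H' then true else a) = true then (false, true) else (if c = 'H' then true else a, true)) t).2 = true
      rw [if_pos hc]; exact ih _
    · show (List.foldl hcStep (if c = 'C' ∧ (if c = 'H' then true else a) = true then (false, true) else (if c = 'H' then true else a, true)) t).2 = true
      rw [if_neg hc]; exact ih _

theorem foldl_hcStep_true (l : List Char) (b : Bool) :
    (l.foldl hcStep (true, b)).2 = (b || l.contains 'C') := by
  induction l generalizing b with
  | nil => simp
  | cons c t ih =>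
    by_cases hc : c = 'C'
    · subst hc
      simp [hcStep, hcStep_snd_true]
    · simp only [List.foldl_cons, hcStep]
      rw [if_neg (by simp [hc]), ite_self, ih]
      simp [Ne.symm hc]

theorem foldl_hcStep_false (l : List Char) (b : Bool) :
    (l.foldl hcStep (false, b)).2 = (b || hcPat l) := by
  induction l generalizing b with
  | nil => simp [hcPat]
  | cons c t ih =>
    by_cases hh : c = 'H'
    · subst hh
      rw [List.foldl_cons]
      show (List.foldl hcStep (if ('H':Char) = 'C' ∧ (if ('H':Char) = 'H' then true else false) = true then (false, true) else (if ('H':Char) = 'H' then true else false, b)) t).2 = (b || hcPat ('H' :: t))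
      rw [if_neg (by rintro ⟨h, -⟩; exact absurd h (by decide)), if_pos rfl, foldl_hcStep_true]
      simp [hcPat]
    · simp only [List.foldl_cons, hcStep, if_neg hh]
      rw [if_neg (by rintro ⟨-, h⟩; exact absurd h (by simp)), ih]
      simp [hcPat, hh]

-- hcPat holds iff the list splits as s ++ 'H' :: t with a 'C' in t
theorem hcPat_iff (l : List Char) :
    hcPat l = true ↔ ∃ s t, l = s ++ 'H' :: t ∧ 'C' ∈ t := by
  induction l with
  | nil => simp [hcPat]
  | cons c t ih =>
    by_cases hh : c = 'H'
    · subst hh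
      simp only [hcPat]
      constructor
      · intro h
        exact ⟨[], t, rfl, by simpa using h⟩
      · rintro ⟨s, t', he, hc⟩
        cases s with
        | nil =>
          simp only [List.nil_append, List.cons.injEq, true_and] at he
          subst he
          simpa using hc
        | cons a s' =>
          simp only [List.cons_append, List.cons.injEq] at he
          have hmem : 'C' ∈ t := by
            rw [he.2]
            exact List.mem_append_right _ (List.mem_cons_of_mem _ hc)
          simpa using hmem
    · simp only [hcPat, if_neg hh, ih]
      constructor
      · rintro ⟨s, t', he, hc⟩
        exact ⟨c :: s, t', by simp [he], hc⟩
      · rintro ⟨s, t', he, hc⟩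
        cases s with
        | nil => simp only [List.nil_append, List.cons.injEq] at he; exact absurd he.1 hh
        | cons a s' =>
          simp only [List.cons_append, List.cons.injEq] at he
          exact ⟨s', t', he.2, hc⟩

theorem hcPat_eq_false_of_not_mem (l : List Char) (h : 'H' ∉ l) : hcPat l = false := by
  induction l with
  | nil => rfl
  | cons c t ih =>
    simp only [List.mem_cons, not_or] at h
    simp only [hcPat, if_neg (fun (hc : c = 'H') => h.1 hc.symm)]
    exact ih h.2

-- with the first 'H' at index k, the pattern is equivalent to a 'C' after index k
theorem hcPat_iff_mem_drop (l : List Char) (k : Nat)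
    (hpre : ['H'] <+: l.drop k)
    (hmin : ∀ i < k, ¬ ['H'] <+: l.drop i) :
    hcPat l = true ↔ 'C' ∈ l.drop (k + 1) := by
  obtain ⟨u, hu⟩ := hpre
  simp only [List.singleton_append] at hu
  have hdrop1 : l.drop (k + 1) = u := by
    simpa [List.tail_drop] using (congrArg List.tail hu).symm
  rw [hcPat_iff]
  constructor
  · rintro ⟨s, t, he, hc⟩
    have hsk : k ≤ s.length := by
      by_contra hlt
      refine hmin s.length (by omega) ⟨t, ?_⟩
      rw [he, List.drop_left]
      simp
    have ht : t = l.drop (s.length + 1) := by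
      rw [he, List.drop_append]
      simp
    have hsub : l.drop (s.length + 1) ⊆ l.drop (k + 1) := by
      have : l.drop (s.length + 1) = (l.drop (k + 1)).drop (s.length - k) := by
        rw [List.drop_drop]
        congr 1
        omega
      rw [this]
      exact (List.drop_sublist _ _).subset
    exact hsub (ht ▸ hc)
  · intro hc
    refine ⟨l.take k, u, ?_, hdrop1 ▸ hc⟩
    conv_lhs => rw [← List.take_append_drop k l]
    rw [hu]

-- ===== VERDICT (by name: the statement is the Claim_ definition above) =====
theorem hc_o_sc_spec : Claim_equal_hc_o_sc := by
  intro direccion _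
  unfold Spec_hc_o_sc hc_o_sc hc_o_sc_alt
  simp only [PySem.Str.find_eq, PySem.Str.isIn_eq, PySem.Str.toList_slice]
  have hHlit : "H".toList = ['H'] := by decide
  have hClit : "C".toList = ['C'] := by decide
  rw [hHlit, hClit]
  rw [foldl_hcStep_false]
  simp only [Bool.false_or]
  by_cases hfind : PySem.Chars.find direccion.toList ['H'] = -1
  · have hnH : 'H' ∉ direccion.toList := by
      have := (PySem.Chars.find_eq_neg_one_iff direccion.toList ['H']).mp hfind
      simpa [List.singleton_infix_iff] using this
    rw [hcPat_eq_false_of_not_mem _ hnH]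
    simp [hfind]
  · have hpos : 0 ≤ PySem.Chars.find direccion.toList ['H'] := by
      have := PySem.Chars.neg_one_le_find direccion.toList ['H']
      omega
    obtain ⟨hfst, hmin⟩ := PySem.Chars.find_spec (s := direccion.toList) (sub := ['H']) hpos
    set h := PySem.Chars.find direccion.toList ['H'] with hh
    have htn : (h + 1).toNat = h.toNat + 1 := by omega
    rw [PySem.Chars.slice_eq_listSlice, PySem.List.slice_from direccion.toList (by omega : (0:Int) ≤ h + 1), htn]
    have hiff := hcPat_iff_mem_drop direccion.toList h.toNat hfst hmin
    by_cases hc : 'C' ∈ direccion.toList.drop (h.toNat + 1)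
    · rw [if_pos (hiff.mpr hc), if_pos]
      refine ⟨hfind, ?_⟩
      rw [PySem.Chars.isIn_iff_infix, List.singleton_infix_iff]
      exact hc
    · rw [if_neg (fun hp => hc (hiff.mp hp)), if_neg]
      rintro ⟨-, hin⟩
      rw [PySem.Chars.isIn_iff_infix, List.singleton_infix_iff] at hin
      exact hc hin
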